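-- pv_equiv track=rewrite | github.com/korylprince/adventofcode | 2017/03/main.py | generate
-- ===== SOURCE A (Python) =====
-- from collections import deque, defaultdict
--
-- def generate(target):
--     path = [(0, 0), (1, 0)]
--     pathSet = set(path)
--     d = deque(((0, 1), (-1, 0), (0, -1), (1, 0)))
--
--     while len(path) != target:
--         next = (path[-1][0] + d[0][0], path[-1][1] + d[0][1])
--
--         if next in pathSet:
--             d.rotate(1)
--             next = (path[-1][0] + d[0][0], path[-1][1] + d[0][1])
--             d.rotate(-1)
--
--         path.append(next)
--         pathSet.add(next)
--
--         if abs(path[-1][0]) == abs(path[-1][1]):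
--             d.rotate(-1)
--
--     return path
-- ===== SOURCE B (Python) =====
-- def generate(target):
--     # Walk the spiral choosing each step's direction directly from the current
--     # coordinates (which ring edge we are on), instead of collision detection
--     # with a visited set and a rotating deque.
--     path = [(0, 0)]
--     x, y = 0, 0
--     while len(path) != target:
--         m = max(abs(x), abs(y))
--         if x == m and -m < y < m:
--             dx, dy = 0, 1
--         elif y == m and x > -m:
--             dx, dy = -1, 0
--         elif x == -m and y > -m:
--             dx, dy = 0, -1
--         else:
--             dx, dy = 1, 0
--         x, y = x + dx, y + dy
--         path.append((x, y))
--     return path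
-- ===== Notes on version B (the rewrite author's own statement) =====
-- stated objective: alternative
-- what changed: B walks the spiral choosing each step's direction arithmetically from the current coordinates (which ring edge the point lies on), replacing A's visited-set collision detection with a rotating direction deque; Pre_ excludes target < 2, where A's `while len(path) != target` loop never terminates.
import Mathlib
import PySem

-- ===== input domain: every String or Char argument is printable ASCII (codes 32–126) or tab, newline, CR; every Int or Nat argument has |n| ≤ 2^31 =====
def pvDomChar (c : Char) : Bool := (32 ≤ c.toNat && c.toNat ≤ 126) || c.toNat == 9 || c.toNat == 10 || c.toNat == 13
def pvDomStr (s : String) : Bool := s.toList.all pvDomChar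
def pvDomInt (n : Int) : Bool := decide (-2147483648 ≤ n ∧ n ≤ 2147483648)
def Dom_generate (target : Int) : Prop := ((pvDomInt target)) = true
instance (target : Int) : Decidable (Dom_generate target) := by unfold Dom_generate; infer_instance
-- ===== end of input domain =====

-- B replaces A's visited-set/deque collision detection by choosing each step's
-- direction arithmetically from the current coordinates (objective: alternative).

-- ===== PORT A =====
-- deque.rotate(1) on the 4-element direction deque (exact for 4-element lists, the only use here)
def rot1 (l : List (Int × Int)) : List (Int × Int) :=
  match l with
  | [a, b, c, d] => [d, a, b, c]
  | l => l

-- deque.rotate(-1) on the 4-element direction deque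
def rotm1 (l : List (Int × Int)) : List (Int × Int) :=
  match l with
  | [a, b, c, d] => [b, c, d, a]
  | l => l

-- one body of A's while-loop: (path, pathSet, d) -> (path, pathSet, d)
def stepA (path : List (Int × Int)) (pathSet : PySem.Set (Int × Int)) (d : List (Int × Int)) :
    List (Int × Int) × PySem.Set (Int × Int) × List (Int × Int) :=
  let last := (PySem.List.pyGet? path (-1)).getD (0, 0)
  let dir0 := (PySem.List.pyGet? d 0).getD (0, 0)
  let next0 := (last.1 + dir0.1, last.2 + dir0.2)
  -- 'if next in pathSet: d.rotate(1); recompute; d.rotate(-1)' — the deque ends unrotated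
  let next :=
    if PySem.Set.contains pathSet next0 then
      let dr := (PySem.List.pyGet? (rot1 d) 0).getD (0, 0)
      (last.1 + dr.1, last.2 + dr.2)
    else next0
  let path' := path ++ [next]
  let set' := PySem.Set.add pathSet next
  let lst := (PySem.List.pyGet? path' (-1)).getD (0, 0)
  let d' := if lst.1.natAbs = lst.2.natAbs then rotm1 d else d
  (path', set', d')

-- 'while len(path) != target' — fuel only bounds the iteration count; with
-- target ≥ 2 (Pre_) the fuel passed by `generate` is exactly the number of
-- iterations Python performs (for target < 2 Python loops forever).
def loopA (target : Int) : Nat → List (Int × Int) → PySem.Set (Int × Int) → List (Int × Int) → List (Int × Int)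
  | fuel, path, pathSet, d =>
    if (path.length : Int) = target then path
    else
      match fuel with
      | 0 => path
      | Nat.succ f =>
        let st := stepA path pathSet d
        loopA target f st.1 st.2.1 st.2.2

def generate (target : Int) : List (Int × Int) :=
  loopA target (target - 2).toNat [(0, 0), (1, 0)]
    (PySem.Set.ofList [(0, 0), (1, 0)]) [(0, 1), (-1, 0), (0, -1), (1, 0)]

-- ===== PORT B =====
-- one body of B's while-loop: position (x, y) -> next position
def stepB (x y : Int) : Int × Int :=
  let m : Int := max |x| |y|
  if x = m ∧ -m < y ∧ y < m then (x, y + 1)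
  else if y = m ∧ -m < x then (x - 1, y)
  else if x = -m ∧ -m < y then (x, y - 1)
  else (x + 1, y)

def loopB (target : Int) : Nat → List (Int × Int) → Int → Int → List (Int × Int)
  | fuel, path, x, y =>
    if (path.length : Int) = target then path
    else
      match fuel with
      | 0 => path
      | Nat.succ f =>
        let p := stepB x y
        loopB target f (path ++ [p]) p.1 p.2

def generate_alt (target : Int) : List (Int × Int) :=
  loopB target (target - 1).toNat [(0, 0)] 0 0

-- ===== PRECONDITION & SPEC =====
-- Pre_ excludes exactly target < 2: there A's 'while len(path) != target' never
-- terminates (path already has 2 points), so A returns on no excluded input.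
def Pre_generate (target : Int) : Prop := 2 ≤ target
instance (target : Int) : Decidable (Pre_generate target) := by unfold Pre_generate; infer_instance
def pvWitness_generate : Int := (9)

def Spec_generate (target : Int) (out : List (Int × Int)) : Prop := out = generate_alt target
instance (target : Int) (out : List (Int × Int)) : Decidable (Spec_generate target out) := by unfold Spec_generate; infer_instance

-- ===== CLAIM (what is proved, stated in full; the proofs are below) =====
def Claim_equal_generate : Prop := ∀ (target : Int), Dom_generate target → Pre_generate target → Spec_generate target (generate target)

-- ===== LEMMAS AND PROOFS =====

-- B's step as a function on points
def mv (q : Int × Int) : Int × Int := stepB q.1 q.2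

-- the spiral sequence: pt n = n-th point appended
def pt : Nat → Int × Int
  | 0 => (0, 0)
  | n + 1 => mv (pt n)

-- first n spiral points
def P (n : Nat) : List (Int × Int) := (List.range n).map pt

-- mv with the ring radius m as an explicit parameter
def mvm (m : Int) (q : Int × Int) : Int × Int :=
  if q.1 = m ∧ -m < q.2 ∧ q.2 < m then (q.1, q.2 + 1)
  else if q.2 = m ∧ -m < q.1 then (q.1 - 1, q.2)
  else if q.1 = -m ∧ -m < q.2 then (q.1, q.2 - 1)
  else (q.1 + 1, q.2)

-- spiral index of a lattice point relative to ring radius m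
def idxm (m : Int) (q : Int × Int) : Int :=
  if q.1 = m ∧ -m < q.2 then (2 * m - 1) ^ 2 + q.2 + m - 1
  else if q.2 = m then (2 * m - 1) ^ 2 + 3 * m - 1 - q.1
  else if q.1 = -m then (2 * m - 1) ^ 2 + 5 * m - 1 - q.2
  else (2 * m - 1) ^ 2 + 7 * m - 1 + q.1

def idx (q : Int × Int) : Int := idxm (max |q.1| |q.2|) q

-- front of A's deque when the last appended point is q, relative to ring radius m
def fdirm (m : Int) (q : Int × Int) : Int × Int :=
  if q.1 = m ∧ q.2 < m then (0, 1)
  else if q.2 = m ∧ -m < q.1 then (-1, 0)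
  else if q.1 = -m ∧ -m < q.2 then (0, -1)
  else (1, 0)

def fdir (q : Int × Int) : Int × Int := fdirm (max |q.1| |q.2|) q

def next4 (v : Int × Int) : Int × Int :=
  if v = (0, 1) then (-1, 0) else if v = (-1, 0) then (0, -1)
  else if v = (0, -1) then (1, 0) else (0, 1)

def cyc (v : Int × Int) : List (Int × Int) :=
  if v = (0, 1) then [(0, 1), (-1, 0), (0, -1), (1, 0)]
  else if v = (-1, 0) then [(-1, 0), (0, -1), (1, 0), (0, 1)]
  else if v = (0, -1) then [(0, -1), (1, 0), (0, 1), (-1, 0)]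
  else [(1, 0), (0, 1), (-1, 0), (0, -1)]

lemma mv_eqm (x y m : Int) (h : max |x| |y| = m) : mv (x, y) = mvm m (x, y) := by
  unfold mv stepB mvm
  rw [h]

lemma max_abs_eq (x y m : Int) (hx1 : -m ≤ x) (hx2 : x ≤ m) (hy1 : -m ≤ y) (hy2 : y ≤ m)
    (h : x = m ∨ x = -m ∨ y = m ∨ y = -m) : max |x| |y| = m := by
  rcases abs_cases x with ⟨e1, _⟩ | ⟨e1, _⟩ <;> rcases abs_cases y with ⟨e2, _⟩ | ⟨e2, _⟩ <;>
    rw [max_def] <;> split <;> omega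

lemma max_abs_facts (x y : Int) :
    -(max |x| |y|) ≤ x ∧ x ≤ max |x| |y| ∧ -(max |x| |y|) ≤ y ∧ y ≤ max |x| |y| ∧
      (x = max |x| |y| ∨ x = -(max |x| |y|) ∨ y = max |x| |y| ∨ y = -(max |x| |y|)) := by
  rcases abs_cases x with ⟨e1, _⟩ | ⟨e1, _⟩ <;> rcases abs_cases y with ⟨e2, _⟩ | ⟨e2, _⟩ <;>
    rcases max_cases |x| |y| with ⟨e3, _⟩ | ⟨e3, _⟩ <;> omega

lemma idx_mv (q : Int × Int) : idx (mv q) = idx q + 1 := by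
  obtain ⟨x, y⟩ := q
  obtain ⟨h1, h2, h3, h4, h5⟩ := max_abs_facts x y
  set m := max |x| |y| with hm
  rw [mv_eqm x y m rfl]
  unfold idx
  by_cases c1 : x = m ∧ -m < y ∧ y < m
  · rw [show mvm m (x, y) = (x, y + 1) from by unfold mvm; rw [if_pos c1]]
    rw [show max |x| |(y+1)| = m from max_abs_eq _ _ _ (by omega) (by omega) (by omega) (by omega) (by omega)]
    rw [← hm]
    unfold idxm
    set s := (2 * m - 1) ^ 2
    split_ifs <;> omega
  · by_cases c2 : y = m ∧ -m < x
    · rw [show mvm m (x, y) = (x - 1, y) from by unfold mvm; rw [if_neg c1, if_pos c2]]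
      have hm1 : 1 ≤ m := by omega
      rw [show max |(x-1)| |y| = m from max_abs_eq _ _ _ (by omega) (by omega) (by omega) (by omega) (by omega)]
      rw [← hm]
      unfold idxm
      set s := (2 * m - 1) ^ 2
      split_ifs <;> omega
    · by_cases c3 : x = -m ∧ -m < y
      · rw [show mvm m (x, y) = (x, y - 1) from by unfold mvm; rw [if_neg c1, if_neg c2, if_pos c3]]
        have hm1 : 1 ≤ m := by omega
        rw [show max |x| |(y-1)| = m from max_abs_eq _ _ _ (by omega) (by omega) (by omega) (by omega) (by omega)]
        rw [← hm]
        unfold idxm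
        set s := (2 * m - 1) ^ 2
        split_ifs <;> omega
      · rw [show mvm m (x, y) = (x + 1, y) from by unfold mvm; rw [if_neg c1, if_neg c2, if_neg c3]]
        by_cases hm0 : m = 0
        · have hx0 : x = 0 := by omega
          have hy0 : y = 0 := by omega
          subst hx0; subst hy0
          decide
        · -- m ≥ 1 and y = -m (bottom edge or the corner (m, -m))
          have hy : y = -m := by omega
          by_cases hc : x = m
          · -- corner: ring changes
            rw [show max |(x+1)| |y| = m + 1 from
              max_abs_eq _ _ _ (by omega) (by omega) (by omega) (by omega) (by omega)]
            rw [← hm]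
            unfold idxm
            have hr : (2 * (m + 1) - 1) ^ 2 = (2 * m - 1) ^ 2 + 8 * m := by ring
            set s := (2 * m - 1) ^ 2
            set t := (2 * (m + 1) - 1) ^ 2
            split_ifs <;> omega
          · rw [show max |(x+1)| |y| = m from
              max_abs_eq _ _ _ (by omega) (by omega) (by omega) (by omega) (by omega)]
            rw [← hm]
            unfold idxm
            set s := (2 * m - 1) ^ 2
            split_ifs <;> omega

lemma idx_pt (n : Nat) : idx (pt n) = (n : Int) := by
  induction n with
  | zero => decide
  | succ n ih => rw [pt, idx_mv, ih]; push_cast; ring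

lemma idx_lt (q : Int × Int) : idx q < (2 * max |q.1| |q.2| + 1) ^ 2 := by
  obtain ⟨x, y⟩ := q
  obtain ⟨h1, h2, h3, h4, h5⟩ := max_abs_facts x y
  set m := max |x| |y| with hm
  unfold idx
  rw [← hm]
  unfold idxm
  have hr : (2 * m + 1) ^ 2 = (2 * m - 1) ^ 2 + 8 * m := by ring
  set s := (2 * m - 1) ^ 2
  set t := (2 * m + 1) ^ 2
  split_ifs <;> omega

lemma idx_ge (q : Int × Int) (h : 1 ≤ max |q.1| |q.2|) : (2 * max |q.1| |q.2| - 1) ^ 2 ≤ idx q := by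
  obtain ⟨x, y⟩ := q
  obtain ⟨h1, h2, h3, h4, h5⟩ := max_abs_facts x y
  set m := max |x| |y| with hm
  unfold idx
  rw [← hm]
  unfold idxm
  set s := (2 * m - 1) ^ 2
  split_ifs <;> omega

lemma idx_inj (q r : Int × Int) (h : idx q = idx r) : q = r := by
  obtain ⟨x1, y1⟩ := q
  obtain ⟨x2, y2⟩ := r
  obtain ⟨a1, a2, a3, a4, a5⟩ := max_abs_facts x1 y1
  obtain ⟨b1, b2, b3, b4, b5⟩ := max_abs_facts x2 y2
  set m1 := max |x1| |y1| with hm1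
  set m2 := max |x2| |y2| with hm2
  have hmono : ∀ (u v : Int), 0 ≤ u → u < v →
      (2 * u + 1) ^ 2 ≤ (2 * v - 1) ^ 2 := by
    intro u v hu huv
    have h0 : (0 : ℤ) ≤ 2 * v - 2 * u - 2 := by omega
    have h1 : (0 : ℤ) ≤ 2 * v + 2 * u := by omega
    nlinarith [mul_nonneg h0 h1]
  rcases lt_trichotomy m1 m2 with hlt | heq | hgt
  · exfalso
    have e1 := idx_lt (x1, y1)
    have e2 := idx_ge (x2, y2) (by rw [← hm2]; omega)
    rw [← hm1] at e1
    rw [← hm2] at e2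
    have := hmono m1 m2 (by omega) hlt
    omega
  · by_cases hm0 : m1 = 0
    · have h0 : x1 = 0 ∧ y1 = 0 ∧ x2 = 0 ∧ y2 = 0 := by omega
      rw [h0.1, h0.2.1, h0.2.2.1, h0.2.2.2]
    · unfold idx at h
      rw [← hm1, ← hm2, ← heq] at h
      unfold idxm at h
      rw [Prod.mk.injEq]
      set s := (2 * m1 - 1) ^ 2
      clear_value m1 m2
      clear hm1 hm2
      split_ifs at h <;> omega
  · exfalso
    have e1 := idx_lt (x2, y2)
    have e2 := idx_ge (x1, y1) (by rw [← hm1]; omega)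
    rw [← hm2] at e1
    rw [← hm1] at e2
    have := hmono m2 m1 (by omega) hgt
    omega

lemma pt_inj (i j : Nat) (h : pt i = pt j) : i = j := by
  have := idx_pt i
  rw [h, idx_pt] at this
  exact_mod_cast this.symm

lemma P_succ (n : Nat) : P (n + 1) = P n ++ [pt n] := by
  simp [P, List.range_succ]

lemma mem_P_iff (q : Int × Int) (n : Nat) : q ∈ P n ↔ ∃ j, j < n ∧ pt j = q := by
  unfold P
  constructor
  · intro hq
    rcases List.mem_map.mp hq with ⟨j, hj, he⟩
    exact ⟨j, List.mem_range.mp hj, he⟩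
  · rintro ⟨j, hj, he⟩
    exact List.mem_map.mpr ⟨j, List.mem_range.mpr hj, he⟩

lemma not_mem_P_self (n : Nat) : pt n ∉ P n := by
  rw [mem_P_iff]
  rintro ⟨j, hj, hq⟩
  have := pt_inj j n hq
  omega

lemma mem_P_of_idx (q : Int × Int) (n j : Nat) (h : idx q = (j : Int)) (hj : j < n) : q ∈ P n := by
  rw [mem_P_iff]
  refine ⟨j, hj, ?_⟩
  apply idx_inj
  rw [idx_pt, h]

-- corner predicate: q is the bottom-right diagonal point (m, -m), m ≥ 1
def isCorner (q : Int × Int) : Prop := 1 ≤ q.1 ∧ q.2 = -q.1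

lemma fdir_step (q : Int × Int) (h : ¬ isCorner q) :
    (q.1 + (fdir q).1, q.2 + (fdir q).2) = mv q := by
  obtain ⟨x, y⟩ := q
  obtain ⟨h1, h2, h3, h4, h5⟩ := max_abs_facts x y
  set m := max |x| |y| with hm
  have hcor : ¬(1 ≤ x ∧ y = -x) := fun hxy => h ⟨hxy.1, hxy.2⟩
  clear h
  rw [mv_eqm x y m rfl]
  unfold fdir
  rw [← hm]
  unfold fdirm mvm
  clear_value m
  clear hm
  dsimp only
  split_ifs <;> simp only [Prod.mk.injEq, and_true, true_and] <;> first | trivial | omega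

lemma corner_facts (q : Int × Int) (h : isCorner q) :
    fdir q = (0, 1) ∧ mv q = (q.1 + 1, q.2) ∧
    idx (q.1, q.2 + 1) = (2 * q.1 - 1) ^ 2 ∧ idx q = (2 * q.1 - 1) ^ 2 + 8 * q.1 - 1 := by
  obtain ⟨x, y⟩ := q
  obtain ⟨hx, hy⟩ := h
  simp only at hx hy
  subst hy
  have hmx : max |x| |(-x)| = x := max_abs_eq _ _ _ (by omega) (by omega) (by omega) (by omega) (by omega)
  have hmx2 : max |x| |(-x + 1)| = x := max_abs_eq _ _ _ (by omega) (by omega) (by omega) (by omega) (by omega)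
  refine ⟨?_, ?_, ?_, ?_⟩
  · unfold fdir
    simp only
    rw [hmx]
    unfold fdirm
    split_ifs <;> first | rfl | omega
  · rw [mv_eqm x (-x) x (by simpa using hmx)]
    unfold mvm
    split_ifs <;> first | rfl | (exfalso; omega)
  · unfold idx
    simp only
    rw [hmx2]
    unfold idxm
    set s := (2 * x - 1) ^ 2
    split_ifs <;> omega
  · unfold idx
    simp only
    rw [hmx]
    unfold idxm
    set s := (2 * x - 1) ^ 2
    split_ifs <;> omega

lemma rot_fdir (q : Int × Int) (h : q ≠ (0, 0)) :
    fdir (mv q) = if (mv q).1.natAbs = (mv q).2.natAbs then next4 (fdir q) else fdir q := by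
  obtain ⟨x, y⟩ := q
  obtain ⟨h1, h2, h3, h4, h5⟩ := max_abs_facts x y
  set m := max |x| |y| with hm
  have hm1 : 1 ≤ m := by
    rcases (by omega : m = 0 ∨ 1 ≤ m) with h0 | hge
    · exfalso; apply h
      have hxy : x = 0 ∧ y = 0 := by omega
      rw [hxy.1, hxy.2]
    · exact hge
  rw [mv_eqm x y m rfl]
  have hfd : fdir (x, y) = fdirm m (x, y) := by unfold fdir; rw [← hm]
  rw [hfd]
  unfold mvm
  by_cases c1 : x = m ∧ -m < y ∧ y < m
  · rw [if_pos c1]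
    have hold : fdirm m (x, y) = (0, 1) := by
      unfold fdirm; split_ifs <;> first | rfl | (exfalso; omega)
    rw [hold, show next4 (0, 1) = ((-1 : Int), (0 : Int)) from rfl]
    have hM : max |x| |(y + 1)| = m :=
      max_abs_eq _ _ _ (by omega) (by omega) (by omega) (by omega) (by omega)
    unfold fdir
    simp only
    rw [hM]
    clear_value m
    clear hm
    by_cases hd : x.natAbs = (y + 1).natAbs
    · rw [if_pos hd]; unfold fdirm; split_ifs <;> first | rfl | (exfalso; omega)
    · rw [if_neg hd]; unfold fdirm; split_ifs <;> first | rfl | (exfalso; omega)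
  · rw [if_neg c1]
    by_cases c2 : y = m ∧ -m < x
    · rw [if_pos c2]
      have hold : fdirm m (x, y) = (-1, 0) := by
        unfold fdirm; split_ifs <;> first | rfl | (exfalso; omega)
      rw [hold, show next4 (-1, 0) = ((0 : Int), (-1 : Int)) from rfl]
      have hM : max |(x - 1)| |y| = m :=
        max_abs_eq _ _ _ (by omega) (by omega) (by omega) (by omega) (by omega)
      unfold fdir
      simp only
      rw [hM]
      clear_value m
      clear hm
      by_cases hd : (x - 1).natAbs = y.natAbs
      · rw [if_pos hd]; unfold fdirm; split_ifs <;> first | rfl | (exfalso; omega)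
      · rw [if_neg hd]; unfold fdirm; split_ifs <;> first | rfl | (exfalso; omega)
    · rw [if_neg c2]
      by_cases c3 : x = -m ∧ -m < y
      · rw [if_pos c3]
        have hold : fdirm m (x, y) = (0, -1) := by
          unfold fdirm; split_ifs <;> first | rfl | (exfalso; omega)
        rw [hold, show next4 (0, -1) = ((1 : Int), (0 : Int)) from rfl]
        have hM : max |x| |(y - 1)| = m :=
          max_abs_eq _ _ _ (by omega) (by omega) (by omega) (by omega) (by omega)
        unfold fdir
        simp only
        rw [hM]
        clear_value m
        clear hm
        by_cases hd : x.natAbs = (y - 1).natAbs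
        · rw [if_pos hd]; unfold fdirm; split_ifs <;> first | rfl | (exfalso; omega)
        · rw [if_neg hd]; unfold fdirm; split_ifs <;> first | rfl | (exfalso; omega)
      · rw [if_neg c3]
        have hy : y = -m := by omega
        by_cases hc : x = m
        · -- corner (m, -m): moves right into ring m + 1
          have hold : fdirm m (x, y) = (0, 1) := by
            unfold fdirm; split_ifs <;> first | rfl | (exfalso; omega)
          rw [hold, show next4 (0, 1) = ((-1 : Int), (0 : Int)) from rfl]
          have hM : max |(x + 1)| |y| = m + 1 :=
            max_abs_eq _ _ _ (by omega) (by omega) (by omega) (by omega) (by omega)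
          unfold fdir
          simp only
          rw [hM]
          clear_value m
          clear hm
          by_cases hd : (x + 1).natAbs = y.natAbs
          · rw [if_pos hd]; unfold fdirm; split_ifs <;> first | rfl | (exfalso; omega)
          · rw [if_neg hd]; unfold fdirm; split_ifs <;> first | rfl | (exfalso; omega)
        · -- bottom edge, moving right within ring m
          have hold : fdirm m (x, y) = (1, 0) := by
            unfold fdirm; split_ifs <;> first | rfl | (exfalso; omega)
          rw [hold, show next4 (1, 0) = ((0 : Int), (1 : Int)) from rfl]
          have hM : max |(x + 1)| |y| = m :=
            max_abs_eq _ _ _ (by omega) (by omega) (by omega) (by omega) (by omega)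
          unfold fdir
          simp only
          rw [hM]
          clear_value m
          clear hm
          by_cases hd : (x + 1).natAbs = y.natAbs
          · rw [if_pos hd]; unfold fdirm; split_ifs <;> first | rfl | (exfalso; omega)
          · rw [if_neg hd]; unfold fdirm; split_ifs <;> first | rfl | (exfalso; omega)

lemma fdir_cases (q : Int × Int) :
    fdir q = (0, 1) ∨ fdir q = (-1, 0) ∨ fdir q = (0, -1) ∨ fdir q = (1, 0) := by
  unfold fdir fdirm
  split_ifs <;> simp

lemma cyc_head (v : Int × Int)
    (hv : v = (0, 1) ∨ v = (-1, 0) ∨ v = (0, -1) ∨ v = (1, 0)) :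
    (PySem.List.pyGet? (cyc v) 0).getD (0, 0) = v := by
  rcases hv with rfl | rfl | rfl | rfl <;> decide

lemma cyc_rot1_head :
    (PySem.List.pyGet? (rot1 (cyc (0, 1))) 0).getD (0, 0) = ((1 : Int), (0 : Int)) := by
  decide

lemma rotm1_cyc (v : Int × Int)
    (hv : v = (0, 1) ∨ v = (-1, 0) ∨ v = (0, -1) ∨ v = (1, 0)) :
    rotm1 (cyc v) = cyc (next4 v) := by
  rcases hv with rfl | rfl | rfl | rfl <;> decide

lemma last_append (l : List (Int × Int)) (a : Int × Int) :
    (PySem.List.pyGet? (l ++ [a]) (-1)).getD (0, 0) = a := by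
  rw [PySem.List.pyGet?_neg_one]
  simp

lemma P_pos_last (n : Nat) : (PySem.List.pyGet? (P (n + 1)) (-1)).getD (0, 0) = pt n := by
  rw [P_succ]; exact last_append _ _

lemma ofList_append_one (l : List (Int × Int)) (a : Int × Int) :
    PySem.Set.add (PySem.Set.ofList l) a = PySem.Set.ofList (l ++ [a]) := by
  rw [PySem.Set.ofList_eq_foldl, PySem.Set.ofList_eq_foldl, List.foldl_append]
  rfl

lemma pt_ne_zero (n : Nat) (hn : 1 ≤ n) : pt n ≠ (0, 0) := by
  intro h
  have := pt_inj n 0 (by rw [h]; rfl)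
  omega

-- one iteration of A from the invariant state reproduces the invariant
lemma stepA_eq (n : Nat) (hn : 1 ≤ n) :
    stepA (P (n + 1)) (PySem.Set.ofList (P (n + 1))) (cyc (fdir (pt n))) =
      (P (n + 2), PySem.Set.ofList (P (n + 2)), cyc (fdir (pt (n + 1)))) := by
  have hv4 := fdir_cases (pt n)
  have hmv : mv (pt n) = pt (n + 1) := rfl
  have hr := rot_fdir (pt n) (pt_ne_zero n hn)
  rw [hmv] at hr
  have hdq : (if (pt (n + 1)).1.natAbs = (pt (n + 1)).2.natAbs
      then rotm1 (cyc (fdir (pt n))) else cyc (fdir (pt n))) = cyc (fdir (pt (n + 1))) := by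
    by_cases hdg : (pt (n + 1)).1.natAbs = (pt (n + 1)).2.natAbs
    · rw [if_pos hdg, rotm1_cyc _ hv4, hr, if_pos hdg]
    · rw [if_neg hdg, hr, if_neg hdg]
  have hset : (PySem.Set.ofList (P (n + 1))).add (pt (n + 1)) = PySem.Set.ofList (P (n + 2)) := by
    rw [ofList_append_one, ← P_succ]
  unfold stepA
  simp only [P_pos_last n, cyc_head _ hv4]
  by_cases hc : isCorner (pt n)
  · -- the candidate collides with the ring-entry point; A side-steps to the right
    obtain ⟨hf, hmvc, hi1, hi0⟩ := corner_facts _ hc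
    have ha1 : 1 ≤ (pt n).1 := hc.1
    have hcand : ((pt n).1 + (fdir (pt n)).1, (pt n).2 + (fdir (pt n)).2)
        = ((pt n).1, (pt n).2 + 1) := by
      rw [hf]; dsimp only; rw [add_zero]
    have hmem : ((pt n).1, (pt n).2 + 1) ∈ P (n + 1) := by
      apply mem_P_of_idx _ _ ((2 * (pt n).1 - 1) ^ 2).toNat
      · rw [hi1, Int.toNat_of_nonneg (sq_nonneg _)]
      · have hsq : 0 ≤ (2 * (pt n).1 - 1) ^ 2 := sq_nonneg _
        have hni := idx_pt n
        rw [hi0] at hni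
        omega
    have hcont : (PySem.Set.ofList (P (n + 1))).contains
        ((pt n).1 + (fdir (pt n)).1, (pt n).2 + (fdir (pt n)).2) = true := by
      rw [hcand, PySem.Set.contains_iff, PySem.Set.mem_ofList]
      exact hmem
    rw [hcont, if_pos rfl]
    have hnext2 : ((pt n).1 + ((PySem.List.pyGet? (rot1 (cyc (fdir (pt n)))) 0).getD (0, 0)).1,
        (pt n).2 + ((PySem.List.pyGet? (rot1 (cyc (fdir (pt n)))) 0).getD (0, 0)).2)
        = pt (n + 1) := by
      rw [hf, cyc_rot1_head]
      dsimp only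
      rw [add_zero, ← hmv, hmvc]
    rw [hnext2, ← P_succ (n + 1)]
    simp only [P_pos_last (n + 1)]
    rw [hdq, hset]
  · -- the candidate is the fresh spiral point
    have hstep : ((pt n).1 + (fdir (pt n)).1, (pt n).2 + (fdir (pt n)).2) = pt (n + 1) := by
      rw [fdir_step _ hc, hmv]
    have hcont : (PySem.Set.ofList (P (n + 1))).contains
        ((pt n).1 + (fdir (pt n)).1, (pt n).2 + (fdir (pt n)).2) = false := by
      rw [hstep]
      refine Bool.eq_false_iff.mpr ?_
      intro hx
      rw [PySem.Set.contains_iff, PySem.Set.mem_ofList] at hx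
      exact not_mem_P_self (n + 1) hx
    rw [hcont, if_neg Bool.false_ne_true]
    rw [hstep, ← P_succ (n + 1)]
    simp only [P_pos_last (n + 1)]
    rw [hdq, hset]

lemma loopA_run (target : Int) : ∀ (fuel n : Nat), 1 ≤ n → ((n : Int) + 1 + fuel = target) →
    loopA target fuel (P (n + 1)) (PySem.Set.ofList (P (n + 1))) (cyc (fdir (pt n))) = P (n + 1 + fuel) := by
  intro fuel
  induction fuel with
  | zero =>
    intro n hn ht
    rw [loopA]
    have : ((P (n + 1)).length : Int) = target := by simp [P]; omega
    simp [this]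
  | succ f ih =>
    intro n hn ht
    rw [loopA]
    have hlen : ((P (n + 1)).length : Int) ≠ target := by simp [P]; omega
    simp only [hlen, if_false]
    rw [stepA_eq n hn]
    have := ih (n + 1) (by omega) (by push_cast; push_cast at ht; omega)
    simpa [show n + 1 + (f + 1) = n + 1 + 1 + f by omega] using this

lemma loopB_run (target : Int) : ∀ (fuel n : Nat), ((n : Int) + 1 + fuel = target) →
    loopB target fuel (P (n + 1)) (pt n).1 (pt n).2 = P (n + 1 + fuel) := by
  intro fuel
  induction fuel with
  | zero =>
    intro n ht
    rw [loopB]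
    have : ((P (n + 1)).length : Int) = target := by simp [P]; omega
    simp [this]
  | succ f ih =>
    intro n ht
    rw [loopB]
    have hlen : ((P (n + 1)).length : Int) ≠ target := by simp [P]; omega
    simp only [hlen, if_false]
    have hst : stepB (pt n).1 (pt n).2 = pt (n + 1) := rfl
    rw [hst, ← P_succ]
    have := ih (n + 1) (by push_cast; push_cast at ht; omega)
    simpa [show n + 1 + (f + 1) = n + 1 + 1 + f by omega] using this

-- ===== VERDICT (by name: the statement is the Claim_ definition above) =====
theorem generate_spec : Claim_equal_generate := by
  intro target _ hpre
  unfold Pre_generate at hpre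
  unfold Spec_generate generate generate_alt
  have hA := loopA_run target (target - 2).toNat 1 (by omega) (by push_cast; omega)
  have hB := loopB_run target (target - 1).toNat 0 (by push_cast; omega)
  have hP2 : P 2 = [(0, 0), (1, 0)] := by decide
  have hP1 : P 1 = [(0, 0)] := by decide
  have hcyc : cyc (fdir (pt 1)) = [(0, 1), (-1, 0), (0, -1), (1, 0)] := by decide
  rw [hP2, hcyc] at hA
  rw [hP1] at hB
  rw [hA, show loopB target (target - 1).toNat [((0 : Int), (0 : Int))] 0 0
      = P (0 + 1 + (target - 1).toNat) from hB]
  congr 1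
  omega
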